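-- pv_equiv track=rewrite | github.com/owey71/p2pp | p2pp/gcodeparser.py | split_csv_strings
-- ===== SOURCE A (Python) =====
-- def split_csv_strings(s):
--     newvalues = []
--     keyval = s.split("=")
--     if len(keyval) > 1:
--         keyword = keyval[0]
--         value = ("=".join(keyval[1:])).strip(' ')
--         values = value.split(";")
--         tmp = None
--         idx = 0
--         while idx < len(values):
--             if tmp is None:
--                 tmp = values[idx]
--             else:
--                 tmp += values[idx]
--             if len(tmp) >= 2:
--                 if tmp[0] == '"' and tmp[-1] == '"':
--                     tmp = tmp[1:-1]
--                     res = ""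
--                     tmp = tmp.replace(" ", "_")
--                     for i in list(tmp):
--                         if i in "0123456789ABCDEFGHIJKLMNOPQRSTUVWXYZabcdefghijklmnopqrstuvwxyz_-":
--                             res = res + i
--                     newvalues.append(res)
--
--                     tmp = ""
--             idx += 1
--     return newvalues
-- ===== SOURCE B (Python) =====
-- _ALLOWED = "0123456789ABCDEFGHIJKLMNOPQRSTUVWXYZabcdefghijklmnopqrstuvwxyz_-"
--
--
-- def split_csv_strings(s):
--     parts = s.split("=")
--     if len(parts) < 2:
--         return []
--     out = []
--     buf = ""
--     # single character-level scan: ';' (and a sentinel ';' at the end) is a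
--     # boundary at which the buffer is tested for the quoted shape; other
--     # characters just extend the buffer.  No token list is ever built.
--     for ch in "=".join(parts[1:]).strip(' ') + ";":
--         if ch != ';':
--             buf += ch
--         elif len(buf) >= 2 and buf[0] == '"' and buf[-1] == '"':
--             out.append("".join('_' if c == ' ' else c
--                                for c in buf[1:-1]
--                                if c == ' ' or c in _ALLOWED))
--             buf = ""
--     return out
-- ===== Notes on version B (the rewrite author's own statement) =====
-- stated objective: simpler
-- what changed: A splits the value on semicolons and runs a while-loop that concatenates tokens into a buffer with an inner character-filter loop; B never builds a token list: it does one character-level scan of the value with a sentinel semicolon appended, extending a buffer on ordinary characters and testing/emitting it only at boundaries, with the cleaning done in a single filter-then-map comprehension.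
import Mathlib
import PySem

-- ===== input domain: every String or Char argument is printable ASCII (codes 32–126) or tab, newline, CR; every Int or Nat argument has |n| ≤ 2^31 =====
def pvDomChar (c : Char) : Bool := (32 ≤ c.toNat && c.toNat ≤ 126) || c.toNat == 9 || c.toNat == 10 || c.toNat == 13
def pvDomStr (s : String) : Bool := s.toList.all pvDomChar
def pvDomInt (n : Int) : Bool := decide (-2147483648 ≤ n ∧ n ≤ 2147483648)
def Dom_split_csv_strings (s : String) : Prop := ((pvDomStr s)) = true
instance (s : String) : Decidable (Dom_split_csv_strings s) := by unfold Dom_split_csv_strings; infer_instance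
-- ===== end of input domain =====

-- B replaces A's tokenised pipeline (split on ';', while-loop concatenating tokens into a
-- buffer, inner character-filter loop) by a single character-level scan of the value with a
-- sentinel ';', testing the buffer only at boundaries; objective: simpler.

-- ===== PORT A =====
def pvAllowedA : List Char :=
  "0123456789ABCDEFGHIJKLMNOPQRSTUVWXYZabcdefghijklmnopqrstuvwxyz_-".toList

-- the inner `for i in list(tmp): if i in "…": res = res + i` loop
def pvFilterLoopA (tmp : List Char) : List Char :=
  tmp.foldl (fun res i => if PySem.Chars.isIn [i] pvAllowedA then res ++ [i] else res) []

-- the `while idx < len(values)` loop, state = (tmp : None | str, newvalues)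
def pvLoopA : List (List Char) → Option (List Char) → List String → List String
  | [], _, acc => acc
  | v :: rest, tmp?, acc =>
    let tmp := match tmp? with
      | none => v
      | some t => t ++ v
    if tmp.length ≥ 2 then
      if PySem.List.pyGet? tmp 0 = some '"' ∧ PySem.List.pyGet? tmp (-1) = some '"' then
        let tmp2 := PySem.Chars.replace (PySem.List.slice tmp (some 1) (some (-1))) [' '] ['_']
        pvLoopA rest (some []) (acc ++ [String.ofList (pvFilterLoopA tmp2)])
      else pvLoopA rest (some tmp) acc
    else pvLoopA rest (some tmp) acc

def split_csv_strings (s : String) : List String :=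
  let keyval := PySem.Chars.splitOn s.toList ['=']
  if keyval.length > 1 then
    let value := PySem.Chars.stripChars (PySem.Chars.join ['='] keyval.tail) [' ']
    let values := PySem.Chars.splitOn value [';']
    pvLoopA values none []
  else []

-- ===== PORT B =====
def pvAllowedB : List Char :=
  "0123456789ABCDEFGHIJKLMNOPQRSTUVWXYZabcdefghijklmnopqrstuvwxyz_-".toList

-- the `"".join('_' if c == ' ' else c for c in buf[1:-1] if c == ' ' or c in _ALLOWED)`
def pvCleanB (seg : List Char) : String :=
  String.ofList ((seg.filter
      (fun c => c = ' ' ∨ PySem.Chars.isIn [c] pvAllowedB)).map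
    (fun c => if c = ' ' then '_' else c))

-- one step of the `for ch in value + ";"` scan; state = (buf, out)
def pvStepB (st : List Char × List String) (ch : Char) : List Char × List String :=
  if ch ≠ ';' then (st.1 ++ [ch], st.2)
  else if st.1.length ≥ 2 ∧ PySem.List.pyGet? st.1 0 = some '"'
      ∧ PySem.List.pyGet? st.1 (-1) = some '"' then
    ([], st.2 ++ [pvCleanB (PySem.List.slice st.1 (some 1) (some (-1)))])
  else st

def split_csv_strings_alt (s : String) : List String :=
  let parts := PySem.Chars.splitOn s.toList ['=']
  if parts.length < 2 then []
  else
    let value := PySem.Chars.stripChars (PySem.Chars.join ['='] parts.tail) [' ']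
    ((value ++ [';']).foldl pvStepB ([], [])).2

-- ===== PRECONDITION & SPEC =====
def Spec_split_csv_strings (s : String) (out : List String) : Prop := out = split_csv_strings_alt s
instance (s : String) (out : List String) : Decidable (Spec_split_csv_strings s out) := by unfold Spec_split_csv_strings; infer_instance

-- ===== CLAIM (what is proved, stated in full; the proofs are below) =====
def Claim_equal_split_csv_strings : Prop := ∀ (s : String), Dom_split_csv_strings s → Spec_split_csv_strings s (split_csv_strings s)

-- ===== LEMMAS AND PROOFS =====

-- a plain structural single-character split, used only in the proofs
def pvSplit1 (c : Char) : List Char → List (List Char)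
  | [] => [[]]
  | a :: s => if a = c then [] :: pvSplit1 c s else (pvSplit1 c s).modifyHead (a :: ·)

theorem pvSplit1_ne_nil (c : Char) (l : List Char) : pvSplit1 c l ≠ [] := by
  cases l with
  | nil => simp [pvSplit1]
  | cons a s =>
    simp only [pvSplit1]
    split_ifs
    · simp
    · cases h : pvSplit1 c s with
      | nil => exact absurd h (pvSplit1_ne_nil c s)
      | cons t ts => simp

theorem pvSplitOn_go_eq (c : Char) :
    ∀ (fuel : Nat) (l cur : List Char) (acc : List (List Char)), l.length < fuel →
      PySem.Chars.splitOn.go [c] fuel l cur acc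
        = acc.reverse ++ (pvSplit1 c l).modifyHead (cur.reverse ++ ·) := by
  intro fuel
  induction fuel with
  | zero => intro l cur acc h; omega
  | succ n ih =>
    intro l cur acc h
    cases l with
    | nil => simp [PySem.Chars.splitOn.go, pvSplit1]
    | cons a rest =>
      rw [PySem.Chars.splitOn.go]
      by_cases hac : a = c
      · subst hac
        have hp : List.isPrefixOf [a] (a :: rest) = true := by simp [List.isPrefixOf]
        rw [if_pos hp]
        have : List.drop (List.length [a]) (a :: rest) = rest := by simp
        rw [this, ih rest [] (cur.reverse :: acc) (by simp at h ⊢; omega)]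
        obtain ⟨t, ts, ht⟩ := List.exists_cons_of_ne_nil (pvSplit1_ne_nil a rest)
        simp [pvSplit1, ht]
      · have hp : List.isPrefixOf [c] (a :: rest) = false := by
          simp [List.isPrefixOf]; exact fun hca => absurd hca.symm hac
        rw [if_neg (by simp [hp])]
        rw [ih rest (a :: cur) acc (by simp at h ⊢; omega)]
        obtain ⟨t, ts, ht⟩ := List.exists_cons_of_ne_nil (pvSplit1_ne_nil c rest)
        simp [pvSplit1, ht, hac]

theorem pvSplitOn_eq_split1 (c : Char) (l : List Char) :
    PySem.Chars.splitOn l [c] = pvSplit1 c l := by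
  rw [PySem.Chars.splitOn, pvSplitOn_go_eq c (l.length + 1) l [] [] (by omega)]
  obtain ⟨t, ts, ht⟩ := List.exists_cons_of_ne_nil (pvSplit1_ne_nil c l)
  simp [ht]

def pvSpc (c : Char) : Char := if c = ' ' then '_' else c

theorem pvReplace_go_eq :
    ∀ (fuel : Nat) (l acc : List Char), l.length ≤ fuel →
      PySem.Chars.replace.go [' '] ['_'] fuel l acc = acc.reverse ++ l.map pvSpc := by
  intro fuel
  induction fuel with
  | zero =>
    intro l acc h
    have : l = [] := List.length_eq_zero_iff.mp (by omega)
    subst this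
    simp [PySem.Chars.replace.go]
  | succ n ih =>
    intro l acc h
    cases l with
    | nil => simp [PySem.Chars.replace.go]
    | cons a rest =>
      rw [PySem.Chars.replace.go]
      by_cases ha : a = ' '
      · subst ha
        have hp : List.isPrefixOf [' '] (' ' :: rest) = true := by simp [List.isPrefixOf]
        rw [if_pos hp]
        have : List.drop (List.length [' ']) (' ' :: rest) = rest := by simp
        rw [this, ih rest (['_'].reverse ++ acc) (by simp at h ⊢; omega)]
        simp [pvSpc]
      · have hp : List.isPrefixOf [' '] (a :: rest) = false := by
          simp [List.isPrefixOf]; exact fun hsa => absurd hsa.symm ha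
        rw [if_neg (by simp [hp]), ih rest (a :: acc) (by simp at h ⊢; omega)]
        simp [pvSpc, ha]

theorem pvReplace_spc (l : List Char) :
    PySem.Chars.replace l [' '] ['_'] = l.map pvSpc := by
  rw [PySem.Chars.replace]
  simp only [List.isEmpty_cons, Bool.false_eq_true, if_false]
  exact pvReplace_go_eq l.length l [] (le_refl _)

theorem pvFoldl_filter {α : Type} (p : α → Bool) (l : List α) (acc : List α) :
    l.foldl (fun res i => if p i then res ++ [i] else res) acc = acc ++ l.filter p := by
  induction l generalizing acc with
  | nil => simp
  | cons x xs ih =>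
    simp only [List.foldl_cons, List.filter_cons]
    by_cases hx : p x = true
    · simp [hx, ih]
    · simp [hx, ih]

-- A's replace-then-filter loop produces exactly B's filter-then-map comprehension
theorem pvClean_agree (seg : List Char) :
    String.ofList (pvFilterLoopA (PySem.Chars.replace seg [' '] ['_'])) = pvCleanB seg := by
  rw [pvReplace_spc, pvCleanB, pvFilterLoopA, pvFoldl_filter, List.nil_append,
    List.filter_map]
  congr 2
  apply List.filter_congr
  intro c _
  by_cases hc : c = ' '
  · subst hc; simp [pvSpc, pvAllowedB]; decide
  · simp [Function.comp, pvSpc, hc, pvAllowedA, pvAllowedB]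

theorem pvLoopA_shift (a : Char) (t : List Char) (ts : List (List Char))
    (buf : List Char) (acc : List String) :
    pvLoopA ((a :: t) :: ts) (some buf) acc = pvLoopA (t :: ts) (some (buf ++ [a])) acc := by
  show pvLoopA ((a :: t) :: ts) (some buf) acc = pvLoopA (t :: ts) (some (buf ++ [a])) acc
  rw [pvLoopA, pvLoopA]
  have : buf ++ a :: t = (buf ++ [a]) ++ t := by simp
  simp only [this]

-- the char-level scan with sentinel equals A's token loop
theorem pvFoldl_eq_loopA (l : List Char) :
    ∀ (buf : List Char) (acc : List String),
      ((l ++ [';']).foldl pvStepB (buf, acc)).2 = pvLoopA (pvSplit1 ';' l) (some buf) acc := by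
  induction l with
  | nil =>
    intro buf acc
    simp only [List.nil_append, List.foldl_cons, List.foldl_nil, pvSplit1]
    rw [pvStepB]
    simp only [ne_eq, not_true_eq_false, if_false]
    rw [pvLoopA]
    simp only [List.append_nil]
    by_cases h2 : buf.length ≥ 2
    · by_cases hq : PySem.List.pyGet? buf 0 = some '"' ∧ PySem.List.pyGet? buf (-1) = some '"'
      · rw [if_pos ⟨h2, hq.1, hq.2⟩, if_pos h2, if_pos hq]
        simp [pvLoopA, pvClean_agree]
      · rw [if_neg (by tauto), if_pos h2, if_neg hq]
        simp [pvLoopA]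
    · rw [if_neg (by tauto), if_neg h2]
      simp [pvLoopA]
  | cons a rest ih =>
    intro buf acc
    simp only [List.cons_append, List.foldl_cons]
    by_cases ha : a = ';'
    · subst ha
      rw [pvStepB]
      simp only [ne_eq, not_true_eq_false, if_false]
      have hsp : pvSplit1 ';' (';' :: rest) = [] :: pvSplit1 ';' rest := by simp [pvSplit1]
      rw [hsp, pvLoopA]
      simp only [List.append_nil]
      by_cases h2 : buf.length ≥ 2
      · by_cases hq : PySem.List.pyGet? buf 0 = some '"' ∧ PySem.List.pyGet? buf (-1) = some '"'
        · rw [if_pos ⟨h2, hq.1, hq.2⟩, if_pos h2, if_pos hq, ih, pvClean_agree]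
        · rw [if_neg (by tauto), if_pos h2, if_neg hq, ih]
      · rw [if_neg (by tauto), if_neg h2, ih]
    · rw [pvStepB, if_pos (by simpa using ha)]
      rw [ih (buf ++ [a]) acc]
      obtain ⟨t, ts, ht⟩ := List.exists_cons_of_ne_nil (pvSplit1_ne_nil ';' rest)
      have hsp : pvSplit1 ';' (a :: rest) = (a :: t) :: ts := by simp [pvSplit1, ha, ht]
      rw [hsp, ht, pvLoopA_shift]

theorem pvLoopA_none (vs : List (List Char)) :
    pvLoopA vs none [] = pvLoopA vs (some []) [] := by
  cases vs with
  | nil => rfl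
  | cons v rest => simp [pvLoopA]

-- ===== VERDICT (by name: the statement is the Claim_ definition above) =====
theorem split_csv_strings_spec : Claim_equal_split_csv_strings := by
  intro s _
  unfold Spec_split_csv_strings split_csv_strings split_csv_strings_alt
  by_cases h : (PySem.Chars.splitOn s.toList ['=']).length > 1
  · have h' : ¬ (PySem.Chars.splitOn s.toList ['=']).length < 2 := by omega
    simp only [h, h', if_true, if_false]
    rw [pvFoldl_eq_loopA, ← pvSplitOn_eq_split1, pvLoopA_none]
  · have h' : (PySem.Chars.splitOn s.toList ['=']).length < 2 := by omega
    simp [h, h']
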